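-- pv_equiv track=rewrite | github.com/tvquizphd/pokedoku | api/service/service.py | str_dist
-- ===== SOURCE A (Python) =====
-- def str_dist(guess, target):
--     def ngrams(s,n):
--         for start in range(0, len(s) - n + 1):
--             yield s[start:start+n]
--
--     found = (0, 0, 0)
--
--     for n in [2,3,4,5,6]:
--         ngrams_guess = set(ngrams(guess, n))
--         ngrams_target = set(ngrams(target, n))
--         union = ngrams_guess & ngrams_target
--         if len(union) == 0: continue
--         offset = min(
--             target.index(chars) for chars in union
--         )
--         found = (n, len(union), offset)
--
--     return found
-- ===== SOURCE B (Python) =====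
-- def str_dist(guess, target):
--     # Descending search over n with early return at the largest matching n.
--     # Per n: one left-to-right scan of target against a guess n-gram set,
--     # taking the offset directly as the first matching position and
--     # accumulating the distinct matched grams (no intersection, no .index).
--     for n in (6, 5, 4, 3, 2):
--         gset = {guess[j:j+n] for j in range(len(guess) - n + 1)}
--         seen = set()
--         offset = 0
--         for i in range(len(target) - n + 1):
--             g = target[i:i+n]
--             if g in gset:
--                 if not seen:
--                     offset = i
--                 seen.add(g)
--         if seen:
--             return (n, len(seen), offset)
--     return (0, 0, 0)
-- ===== Notes on version B (the rewrite author's own statement) =====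
-- stated objective: faster
-- what changed: Replaces A's ascending overwrite loop (build both n-gram sets, intersect them, then rescan target with .index for every shared gram) by a descending-n search that returns at the first (largest) matching n, whose inner loop is one left-to-right scan of target against a guess n-gram set, accumulating the distinct matches and taking the offset directly as the first matching position.
import Mathlib
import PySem

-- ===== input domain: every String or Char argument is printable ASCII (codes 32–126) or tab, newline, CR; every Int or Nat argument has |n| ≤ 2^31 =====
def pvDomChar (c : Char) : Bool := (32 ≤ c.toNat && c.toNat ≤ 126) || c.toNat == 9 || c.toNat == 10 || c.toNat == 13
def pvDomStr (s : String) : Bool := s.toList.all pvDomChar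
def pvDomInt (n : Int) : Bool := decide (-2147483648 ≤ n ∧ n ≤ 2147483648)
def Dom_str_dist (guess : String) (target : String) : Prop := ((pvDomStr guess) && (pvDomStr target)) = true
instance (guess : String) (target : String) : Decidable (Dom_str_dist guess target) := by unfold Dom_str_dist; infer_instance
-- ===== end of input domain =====

-- B replaces A's per-n machinery (two n-gram sets, intersection, a .index rescan per shared gram)
-- by a descending-n search with early return whose inner loop is ONE scan of target against a guess
-- n-gram set, taking the offset directly as the first matching position (objective: faster).

-- ===== PORT A =====
-- ngrams(s, n): the generator, as the list of slices s[start:start+n]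
def pvNgramsA (s : String) (n : Int) : List String :=
  (PySem.List.pyRange 0 (PySem.Str.len s - n + 1) 1).map
    (fun start => PySem.Str.slice s (some start) (some (start + n)))

-- one iteration of A's 'for n in [2,3,4,5,6]' body, updating 'found'
def pvStepA (guess : String) (target : String) (found : Int × Int × Int) (n : Int) :
    Int × Int × Int :=
  let ngramsGuess := PySem.Set.ofList (pvNgramsA guess n)
  let ngramsTarget := PySem.Set.ofList (pvNgramsA target n)
  let union := PySem.Set.inter ngramsGuess ngramsTarget
  if PySem.Set.len union = 0 then found
  else
    -- target.index(chars): every chars ∈ union is a substring of target, so find = index (≥ 0);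
    -- min over the nonempty generator: union ≠ [] here, so min? = some and the .getD 0 default is unreachable
    let offset :=
      (PySem.List.min? (union.map (fun chars => PySem.Str.find target chars)) (fun x => x)).getD 0
    (n, PySem.Set.len union, offset)

def str_dist (guess : String) (target : String) : Int × Int × Int :=
  [(2 : Int), 3, 4, 5, 6].foldl (pvStepA guess target) (0, 0, 0)

-- ===== PORT B =====
-- target[i:i+n]
def pvGramB (target : String) (n : Int) (i : Int) : String :=
  PySem.Str.slice target (some i) (some (i + n))

-- {guess[j:j+n] for j in range(len(guess) - n + 1)}
def pvGsetB (guess : String) (n : Int) : PySem.Set String :=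
  PySem.Set.ofList ((PySem.List.pyRange 0 (PySem.Str.len guess - n + 1) 1).map
    (fun j => PySem.Str.slice guess (some j) (some (j + n))))

-- body of B's inner 'for i in range(len(target) - n + 1)' loop; state = (seen, offset)
def pvStepB (gset : PySem.Set String) (target : String) (n : Int)
    (acc : PySem.Set String × Int) (i : Int) : PySem.Set String × Int :=
  let g := pvGramB target n i
  if PySem.Set.contains gset g then
    let acc1 := if acc.1 = [] then (acc.1, i) else acc
    (PySem.Set.add acc1.1 g, acc1.2)
  else acc

-- the inner scan of target for one n
def pvInnerB (guess : String) (target : String) (n : Int) : PySem.Set String × Int :=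
  let gset := pvGsetB guess n
  (PySem.List.pyRange 0 (PySem.Str.len target - n + 1) 1).foldl
    (pvStepB gset target n) ([], 0)

-- the descending 'for n in (6, 5, 4, 3, 2)' with early return; falls through to (0, 0, 0)
def pvScanB (guess : String) (target : String) : List Int → Int × Int × Int
  | [] => (0, 0, 0)
  | n :: rest =>
    let so := pvInnerB guess target n
    if so.1 = [] then pvScanB guess target rest
    else (n, (so.1.length : Int), so.2)

def str_dist_alt (guess : String) (target : String) : Int × Int × Int :=
  pvScanB guess target [(6 : Int), 5, 4, 3, 2]

-- ===== PRECONDITION & SPEC =====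
def Spec_str_dist (guess : String) (target : String) (out : Int × Int × Int) : Prop := out = str_dist_alt guess target
instance (guess : String) (target : String) (out : Int × Int × Int) : Decidable (Spec_str_dist guess target out) := by unfold Spec_str_dist; infer_instance

-- ===== CLAIM (what is proved, stated in full; the proofs are below) =====
def Claim_equal_str_dist : Prop := ∀ (guess : String) (target : String), Dom_str_dist guess target → Spec_str_dist guess target (str_dist guess target)

-- ===== LEMMAS AND PROOFS =====

-- A's shared n-gram set
def pvSharedA (guess : String) (target : String) (n : Int) : PySem.Set String :=
  PySem.Set.inter (PySem.Set.ofList (pvNgramsA guess n)) (PySem.Set.ofList (pvNgramsA target n))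

-- A's result tuple for one matching n
def pvResA (guess : String) (target : String) (n : Int) : Int × Int × Int :=
  (n, PySem.Set.len (pvSharedA guess target n),
    (PySem.List.min? ((pvSharedA guess target n).map (fun chars => PySem.Str.find target chars))
      (fun x => x)).getD 0)

-- B's hit positions for one n, in ascending order
def pvHits (guess : String) (target : String) (n : Int) : List Int :=
  (PySem.List.pyRange 0 (PySem.Str.len target - n + 1) 1).filter
    (fun i => PySem.Set.contains (pvGsetB guess n) (pvGramB target n i))

-- ----- characterisation of B's inner scan -----

theorem pvStepB_of_ne (g t : String) (n : Int) (s : PySem.Set String) (o i : Int) (hs : s ≠ []) :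
    pvStepB (pvGsetB g n) t n (s, o) i =
      (if PySem.Set.contains (pvGsetB g n) (pvGramB t n i)
        then PySem.Set.add s (pvGramB t n i) else s, o) := by
  simp only [pvStepB, if_neg hs]
  split <;> rfl

theorem foldl_stepB_of_ne (g t : String) (n : Int) (l : List Int) (s : PySem.Set String) (o : Int)
    (hs : s ≠ []) :
    l.foldl (pvStepB (pvGsetB g n) t n) (s, o) =
      (l.foldl (fun s i => if PySem.Set.contains (pvGsetB g n) (pvGramB t n i)
          then PySem.Set.add s (pvGramB t n i) else s) s, o) := by
  induction l generalizing s with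
  | nil => rfl
  | cons i l ih =>
    rw [List.foldl_cons, List.foldl_cons, pvStepB_of_ne g t n s o i hs]
    split
    · exact ih _ (by simp [PySem.Set.add_eq_ite]; split <;> simp [hs])
    · exact ih _ hs

theorem foldl_add_if_eq_update (g t : String) (n : Int) (l : List Int) (s : PySem.Set String) :
    l.foldl (fun s i => if PySem.Set.contains (pvGsetB g n) (pvGramB t n i)
        then PySem.Set.add s (pvGramB t n i) else s) s =
      PySem.Set.update s
        ((l.filter (fun i => PySem.Set.contains (pvGsetB g n) (pvGramB t n i))).map (pvGramB t n)) := by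
  induction l generalizing s with
  | nil => rfl
  | cons i l ih =>
    rw [List.foldl_cons, List.filter_cons]
    split
    · rw [List.map_cons, PySem.Set.update_cons, ih]
    · exact ih s

theorem innerB_char (g t : String) (n : Int) :
    pvInnerB g t n =
      match pvHits g t n with
      | [] => ([], 0)
      | h :: _ => (PySem.Set.ofList ((pvHits g t n).map (pvGramB t n)), h) := by
  unfold pvInnerB pvHits
  generalize PySem.List.pyRange 0 (PySem.Str.len t - n + 1) 1 = l
  induction l with
  | nil => rfl
  | cons i l ih =>
    rw [List.foldl_cons, List.filter_cons]
    by_cases hi : PySem.Set.contains (pvGsetB g n) (pvGramB t n i) = true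
    · have h1 : pvStepB (pvGsetB g n) t n ([], 0) i = ([pvGramB t n i], i) := by
        simp only [pvStepB, hi]; simp
      rw [if_pos hi, h1,
        foldl_stepB_of_ne g t n l [pvGramB t n i] i (by simp),
        foldl_add_if_eq_update]
      simp only [List.map_cons]
      rfl
    · rw [if_neg hi]
      rw [Bool.not_eq_true] at hi
      have h0 : pvStepB (pvGsetB g n) t n ([], 0) i = ([], 0) := by
        simp only [pvStepB, hi]; simp
      rw [h0, ih]

-- ----- n-grams, infixes and find -----

-- an n-gram slice, on the character-list side
theorem toList_gram (s : String) (nn k : Nat) :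
    (PySem.Str.slice s (some (k : Int)) (some ((k : Int) + (nn : Int)))).toList =
      (s.toList.drop k).take nn := by
  simp [PySem.Str.slice, PySem.List.slice_natCast_add]

theorem toList_gramB (t : String) (nn k : Nat) :
    (pvGramB t (nn : Int) (k : Int)).toList = (t.toList.drop k).take nn := toList_gram t nn k

-- being a length-nn infix = being the n-gram at some valid position
theorem infix_iff_gram (t : String) (nn : Nat) (x : String) :
    (x.toList <:+: t.toList ∧ x.toList.length = nn) ↔
      ∃ k : Nat, k + nn ≤ t.toList.length ∧ x = pvGramB t (nn : Int) (k : Int) := by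
  constructor
  · rintro ⟨⟨pre, suf, hps⟩, hlen⟩
    refine ⟨pre.length, ?_, ?_⟩
    · have : (pre ++ x.toList ++ suf).length = t.toList.length := by rw [hps]
      simp [hlen] at this
      have hL : t.toList.length = t.length := String.length_toList
      omega
    · apply String.toList_inj.mp
      rw [toList_gramB]
      have hdrop : t.toList.drop pre.length = x.toList ++ suf := by
        rw [← hps, List.append_assoc, List.drop_left]
      rw [hdrop, ← hlen, List.take_left]
  · rintro ⟨k, hk, rfl⟩
    rw [toList_gramB]
    refine ⟨((t.toList.drop k).take_prefix nn).isInfix.trans (t.toList.drop_suffix k).isInfix, ?_⟩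
    simp
    have hL : t.toList.length = t.length := String.length_toList
    omega

-- a prefix of drop k of given length IS the n-gram at k
theorem gram_of_prefix_drop (t : String) (nn : Nat) (hnn : 1 ≤ nn) (x : String) (k : Nat)
    (hlen : x.toList.length = nn) (hp : x.toList <+: t.toList.drop k) :
    k + nn ≤ t.toList.length ∧ x = pvGramB t (nn : Int) (k : Int) := by
  have hle : x.toList.length ≤ (t.toList.drop k).length := hp.length_le
  simp at hle
  have hL : t.toList.length = t.length := String.length_toList
  have hX : x.toList.length = x.length := String.length_toList
  refine ⟨by omega, ?_⟩
  apply String.toList_inj.mp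
  rw [toList_gramB, ← hlen, ← List.prefix_iff_eq_take.mp hp]

theorem mem_ngramsA (s : String) (nn : Nat) (x : String) :
    x ∈ pvNgramsA s (nn : Int) ↔ x.toList <:+: s.toList ∧ x.toList.length = nn := by
  unfold pvNgramsA
  rw [List.mem_map, infix_iff_gram]
  constructor
  · rintro ⟨i, hi, rfl⟩
    rw [PySem.List.mem_pyRange_one] at hi
    have hlen : PySem.Str.len s = (s.toList.length : Int) := by simp
    rw [hlen] at hi
    refine ⟨i.toNat, by omega, ?_⟩
    unfold pvGramB
    rw [Int.toNat_of_nonneg hi.1]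
  · rintro ⟨k, hk, rfl⟩
    refine ⟨(k : Int), ?_, rfl⟩
    rw [PySem.List.mem_pyRange_one]
    have hlen : PySem.Str.len s = (s.toList.length : Int) := by simp
    rw [hlen]
    omega

-- B's guess n-gram set is exactly A's guess n-gram list as a set
theorem gsetB_eq (g : String) (n : Int) : pvGsetB g n = PySem.Set.ofList (pvNgramsA g n) := rfl

theorem contains_gsetB (g : String) (nn : Nat) (x : String) :
    PySem.Set.contains (pvGsetB g (nn : Int)) x = true ↔
      x.toList <:+: g.toList ∧ x.toList.length = nn := by
  rw [gsetB_eq, PySem.Set.contains_iff, PySem.Set.mem_ofList, mem_ngramsA]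

-- pvHits is the ascending list of positions whose n-gram occurs in guess
theorem sorted_hits (g t : String) (n : Int) : (pvHits g t n).Pairwise (· < ·) :=
  (PySem.List.pairwise_lt_pyRange_one 0 _).filter _

theorem mem_hits (g t : String) (nn : Nat) (i : Int) :
    i ∈ pvHits g t (nn : Int) ↔
      0 ≤ i ∧ i + nn ≤ (t.toList.length : Int) ∧
        PySem.Set.contains (pvGsetB g (nn : Int)) (pvGramB t (nn : Int) i) = true := by
  unfold pvHits
  rw [List.mem_filter, PySem.List.mem_pyRange_one]
  have hlen : PySem.Str.len t = (t.toList.length : Int) := by simp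
  rw [hlen]
  constructor
  · rintro ⟨⟨h0, h1⟩, h2⟩
    exact ⟨h0, by omega, h2⟩
  · rintro ⟨h0, h1, h2⟩
    exact ⟨⟨h0, by omega⟩, h2⟩

-- membership in A's shared set, in terms of B's hits
theorem mem_sharedA (g t : String) (nn : Nat) (x : String) :
    x ∈ pvSharedA g t (nn : Int) ↔
      ∃ i ∈ pvHits g t (nn : Int), x = pvGramB t (nn : Int) i := by
  unfold pvSharedA
  rw [PySem.Set.mem_inter, PySem.Set.mem_ofList, PySem.Set.mem_ofList, mem_ngramsA, mem_ngramsA]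
  constructor
  · rintro ⟨⟨hgin, hglen⟩, htin⟩
    obtain ⟨k, hk, hx⟩ := (infix_iff_gram t nn x).mp htin
    refine ⟨(k : Int), ?_, hx⟩
    rw [mem_hits]
    refine ⟨by omega, by omega, ?_⟩
    rw [← hx, contains_gsetB]
    exact ⟨hgin, hglen⟩
  · rintro ⟨i, hi, rfl⟩
    rw [mem_hits] at hi
    obtain ⟨h0, h1, h2⟩ := hi
    have hik : i = (i.toNat : Int) := by omega
    have hbound : i.toNat + nn ≤ t.toList.length := by omega
    have hgt : (pvGramB t (nn : Int) i).toList <:+: t.toList ∧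
        (pvGramB t (nn : Int) i).toList.length = nn := by
      rw [hik]
      exact (infix_iff_gram t nn _).mpr ⟨i.toNat, hbound, rfl⟩
    refine ⟨⟨?_, hgt.2⟩, hgt⟩
    exact ((contains_gsetB g nn _).mp h2).1

-- every shared gram's first occurrence in target is itself a hit position
theorem find_mem_hits (g t : String) (nn : Nat) (hnn : 1 ≤ nn) (x : String)
    (hx : x ∈ pvSharedA g t (nn : Int)) :
    PySem.Str.find t x ∈ pvHits g t (nn : Int) ∧
      x.toList <:+: t.toList ∧ x.toList.length = nn := by
  have hs := (mem_sharedA g t nn x).mp hx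
  obtain ⟨i, hi, hxi⟩ := hs
  have hchar : x.toList <:+: t.toList ∧ x.toList.length = nn := by
    rw [mem_hits] at hi
    obtain ⟨h0, h1, _⟩ := hi
    rw [hxi]
    have hik : i = (i.toNat : Int) := by omega
    rw [hik]
    exact (infix_iff_gram t nn _).mpr ⟨i.toNat, by omega, rfl⟩
  have hisin : PySem.Set.contains (pvGsetB g (nn : Int)) x = true := by
    rw [mem_hits] at hi
    rw [hxi]; exact hi.2.2
  refine ⟨?_, hchar⟩
  rw [PySem.Str.find_eq]
  have hnonneg : 0 ≤ PySem.Chars.find t.toList x.toList :=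
    (PySem.Chars.find_nonneg_iff _ _).mpr hchar.1
  obtain ⟨hpre, _⟩ := PySem.Chars.find_spec hnonneg
  obtain ⟨hb, hxg⟩ := gram_of_prefix_drop t nn hnn x _ hchar.2 hpre
  rw [mem_hits]
  refine ⟨hnonneg, by omega, ?_⟩
  have hcast : PySem.Chars.find t.toList x.toList =
      (((PySem.Chars.find t.toList x.toList).toNat : Nat) : Int) := by omega
  rw [hcast, ← hxg, hisin]

-- the minimum of target.index over the shared set is the first hit position
theorem min_find_eq_head (g t : String) (nn : Nat) (hnn : 1 ≤ nn) (h : Int) (r : List Int)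
    (hh : pvHits g t (nn : Int) = h :: r) :
    (PySem.List.min? ((pvSharedA g t (nn : Int)).map (fun chars => PySem.Str.find t chars))
      (fun x => x)) = some h := by
  have hhead : ∀ i ∈ pvHits g t (nn : Int), h ≤ i := by
    have hp := sorted_hits g t (nn : Int)
    rw [hh, List.pairwise_cons] at hp
    intro i hi
    rw [hh] at hi
    rcases List.mem_cons.mp hi with rfl | hm
    · exact le_refl _
    · exact le_of_lt (hp.1 i hm)
  have hmemh : h ∈ pvHits g t (nn : Int) := by rw [hh]; exact List.mem_cons_self
  have hgramS : pvGramB t (nn : Int) h ∈ pvSharedA g t (nn : Int) :=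
    (mem_sharedA g t nn _).mpr ⟨h, hmemh, rfl⟩
  -- find at the head gram is exactly h
  have hfindh : PySem.Str.find t (pvGramB t (nn : Int) h) = h := by
    obtain ⟨hfh, hinf, hlen⟩ := find_mem_hits g t nn hnn _ hgramS
    have hge : h ≤ PySem.Str.find t (pvGramB t (nn : Int) h) := hhead _ hfh
    -- and ≤ h: the gram is a prefix of target dropped at h, so find's minimality applies
    have h0 : 0 ≤ h := ((mem_hits g t nn h).mp hmemh).1
    have hb : h + nn ≤ (t.toList.length : Int) := ((mem_hits g t nn h).mp hmemh).2.1
    have hik : h = (h.toNat : Int) := by omega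
    have hprefix : (pvGramB t (nn : Int) h).toList <+: t.toList.drop h.toNat := by
      rw [hik, toList_gramB]
      exact (t.toList.drop h.toNat).take_prefix nn
    rw [PySem.Str.find_eq] at hge ⊢
    have hnonneg : 0 ≤ PySem.Chars.find t.toList (pvGramB t (nn : Int) h).toList :=
      (PySem.Chars.find_nonneg_iff _ _).mpr hinf
    obtain ⟨_, hmin⟩ := PySem.Chars.find_spec hnonneg
    by_contra hne
    have hlt : h.toNat < (PySem.Chars.find t.toList (pvGramB t (nn : Int) h).toList).toNat := by
      omega
    exact hmin h.toNat hlt hprefix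
  have hne : (pvSharedA g t (nn : Int)).map (fun chars => PySem.Str.find t chars) ≠ [] := by
    intro hnil
    rw [List.map_eq_nil_iff] at hnil
    rw [hnil] at hgramS
    exact List.not_mem_nil hgramS
  rcases e : PySem.List.min? ((pvSharedA g t (nn : Int)).map (fun chars => PySem.Str.find t chars))
      (fun x => x) with _ | m
  · exact absurd ((PySem.List.min?_eq_none_iff _ _).mp e) hne
  · have hmem := PySem.List.min?_mem e
    obtain ⟨x, hxS, hxm⟩ := List.mem_map.mp hmem
    have hm_hit : m ∈ pvHits g t (nn : Int) := by
      rw [← hxm]; exact (find_mem_hits g t nn hnn x hxS).1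
    have h1 : h ≤ m := hhead m hm_hit
    have h2 : m ≤ h := by
      have := PySem.List.min?_isMin e (PySem.Str.find t (pvGramB t (nn : Int) h))
        (List.mem_map.mpr ⟨_, hgramS, rfl⟩)
      rw [hfindh] at this
      exact this
    rw [le_antisymm h2 h1]

-- ----- per-n agreement -----

theorem per_n (g t : String) (nn : Nat) (hnn : 1 ≤ nn) :
    (pvSharedA g t (nn : Int) = [] ↔ (pvInnerB g t (nn : Int)).1 = []) ∧
    (pvSharedA g t (nn : Int) ≠ [] →
      pvResA g t (nn : Int) =
        ((nn : Int), ((pvInnerB g t (nn : Int)).1.length : Int),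
          (pvInnerB g t (nn : Int)).2)) := by
  rcases e : pvHits g t (nn : Int) with _ | ⟨h, r⟩
  · have hshared : pvSharedA g t (nn : Int) = [] := by
      rw [List.eq_nil_iff_forall_not_mem]
      intro x hx
      obtain ⟨i, hi, _⟩ := (mem_sharedA g t nn x).mp hx
      rw [e] at hi
      exact List.not_mem_nil hi
    have hinner : pvInnerB g t (nn : Int) = ([], 0) := by
      rw [innerB_char, e]
    rw [hshared, hinner]
    exact ⟨by simp, fun hc => absurd rfl hc⟩
  · have hinner : pvInnerB g t (nn : Int) =
        (PySem.Set.ofList ((pvHits g t (nn : Int)).map (pvGramB t (nn : Int))), h) := by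
      rw [innerB_char, e]
    have hgramS : pvGramB t (nn : Int) h ∈ pvSharedA g t (nn : Int) :=
      (mem_sharedA g t nn _).mpr ⟨h, by rw [e]; exact List.mem_cons_self, rfl⟩
    have hsne : pvSharedA g t (nn : Int) ≠ [] := List.ne_nil_of_mem hgramS
    have hbne : (pvInnerB g t (nn : Int)).1 ≠ [] := by
      rw [hinner]
      exact List.ne_nil_of_mem ((PySem.Set.mem_ofList _ _).mpr
        (List.mem_map.mpr ⟨h, by rw [e]; exact List.mem_cons_self, rfl⟩))
    refine ⟨⟨fun hc => absurd hc hsne, fun hc => absurd hc hbne⟩, fun _ => ?_⟩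
    -- lengths agree: both sides are nodup lists with the same members
    have hlen : (pvSharedA g t (nn : Int)).length = (pvInnerB g t (nn : Int)).1.length := by
      rw [hinner]
      apply List.Perm.length_eq
      apply (List.perm_ext_iff_of_nodup ?_ ?_).mpr
      · intro x
        rw [PySem.Set.mem_ofList, mem_sharedA, List.mem_map]
        constructor
        · rintro ⟨i, hi, rfl⟩; exact ⟨i, hi, rfl⟩
        · rintro ⟨i, hi, rfl⟩; exact ⟨i, hi, rfl⟩
      · exact PySem.Set.nodup_inter _ _ (PySem.Set.nodup_ofList _)
      · exact PySem.Set.nodup_ofList _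
    unfold pvResA
    rw [min_find_eq_head g t nn hnn h r e, hinner]
    simp [PySem.Set.len, hlen, hinner]

-- ----- glue: ascending overwrite fold = descending early-return scan -----

theorem pvStepA_eq (g t : String) (acc : Int × Int × Int) (n : Int) :
    pvStepA g t acc n = if pvSharedA g t n = [] then acc else pvResA g t n := by
  unfold pvStepA pvResA pvSharedA pvNgramsA
  simp only [PySem.Set.len]
  by_cases h : PySem.Set.inter
      (PySem.Set.ofList ((PySem.List.pyRange 0 (PySem.Str.len g - n + 1) 1).map
        (fun i => PySem.Str.slice g (some i) (some (i + n)))))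
      (PySem.Set.ofList ((PySem.List.pyRange 0 (PySem.Str.len t - n + 1) 1).map
        (fun i => PySem.Str.slice t (some i) (some (i + n))))) = []
  · simp
  · simp [List.length_eq_zero_iff]

-- A's scan with an arbitrary fallback accumulator
def pvScanAux (guess : String) (target : String) (acc : Int × Int × Int) :
    List Int → Int × Int × Int
  | [] => acc
  | n :: rest =>
    if pvSharedA guess target n = [] then pvScanAux guess target acc rest
    else pvResA guess target n

theorem pvScanAux_append (g t : String) (l : List Int) (n : Int) (acc : Int × Int × Int) :
    pvScanAux g t acc (l ++ [n]) = pvScanAux g t (pvStepA g t acc n) l := by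
  induction l with
  | nil => simp [pvScanAux, pvStepA_eq]
  | cons m l ih =>
    simp only [List.cons_append, pvScanAux]
    split <;> simp [ih]

theorem foldl_eq_scanAux (g t : String) (ns : List Int) (acc : Int × Int × Int) :
    ns.foldl (pvStepA g t) acc = pvScanAux g t acc ns.reverse := by
  induction ns generalizing acc with
  | nil => rfl
  | cons n ns ih =>
    simp only [List.foldl_cons, List.reverse_cons, ih, pvScanAux_append]

theorem scanB_eq_scanAux (g t : String) (ns : List Int)
    (hns : ∀ n ∈ ns, ∃ nn : Nat, 1 ≤ nn ∧ n = (nn : Int)) :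
    pvScanB g t ns = pvScanAux g t (0, 0, 0) ns := by
  induction ns with
  | nil => rfl
  | cons n ns ih =>
    obtain ⟨nn, hnn, rfl⟩ := hns n (by simp)
    obtain ⟨hiff, hval⟩ := per_n g t nn hnn
    simp only [pvScanB, pvScanAux]
    by_cases hs : pvSharedA g t (nn : Int) = []
    · rw [if_pos (hiff.mp hs), if_pos hs, ih (fun m hm => hns m (by simp [hm]))]
    · rw [if_neg (fun hb => hs (hiff.mpr hb)), if_neg hs, hval hs]

-- ===== VERDICT (by name: the statement is the Claim_ definition above) =====
theorem str_dist_spec : Claim_equal_str_dist := by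
  intro g t _
  unfold Spec_str_dist str_dist str_dist_alt
  rw [foldl_eq_scanAux, ← scanB_eq_scanAux]
  · rfl
  · intro n hn
    fin_cases hn
    · exact ⟨6, by norm_num⟩
    · exact ⟨5, by norm_num⟩
    · exact ⟨4, by norm_num⟩
    · exact ⟨3, by norm_num⟩
    · exact ⟨2, by norm_num⟩
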